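-- pv_equiv track=rewrite | github.com/yodaksha/Drone-Swarm-Project | drone_swarm.py | build_boustrophedon_path
-- ===== SOURCE A (Python) =====
-- def build_boustrophedon_path(regions_in_slice):
--     if not regions_in_slice:
--         return []
--
--     col_map = {}
--     for (rx, ry) in regions_in_slice:
--         col_map.setdefault(rx, []).append(ry)
--
--     path = []
--     for col_idx, rx in enumerate(sorted(col_map)):
--         ry_list = sorted(col_map[rx])
--         if col_idx % 2 == 1:
--             ry_list = list(reversed(ry_list))
--         for ry in ry_list:
--             path.append((rx, ry))
--
--     return path
-- ===== SOURCE B (Python) =====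
-- def build_boustrophedon_path(regions_in_slice):
--     pts = regions_in_slice
--     path = []
--     flip = False
--     while pts:
--         x = min(p[0] for p in pts)
--         col = sorted(p[1] for p in pts if p[0] == x)
--         if flip:
--             col.reverse()
--         path += [(x, y) for y in col]
--         pts = [p for p in pts if p[0] != x]
--         flip = not flip
--     return path
-- ===== Notes on version B (the rewrite author's own statement) =====
-- stated objective: alternative
-- what changed: Replaced the column dict + enumerate-over-sorted-keys pass by a dict-free selection loop that repeatedly extracts the minimum-x column from the remaining points (min + filter + one-key sort), alternating direction with a boolean flag.
import Mathlib
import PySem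

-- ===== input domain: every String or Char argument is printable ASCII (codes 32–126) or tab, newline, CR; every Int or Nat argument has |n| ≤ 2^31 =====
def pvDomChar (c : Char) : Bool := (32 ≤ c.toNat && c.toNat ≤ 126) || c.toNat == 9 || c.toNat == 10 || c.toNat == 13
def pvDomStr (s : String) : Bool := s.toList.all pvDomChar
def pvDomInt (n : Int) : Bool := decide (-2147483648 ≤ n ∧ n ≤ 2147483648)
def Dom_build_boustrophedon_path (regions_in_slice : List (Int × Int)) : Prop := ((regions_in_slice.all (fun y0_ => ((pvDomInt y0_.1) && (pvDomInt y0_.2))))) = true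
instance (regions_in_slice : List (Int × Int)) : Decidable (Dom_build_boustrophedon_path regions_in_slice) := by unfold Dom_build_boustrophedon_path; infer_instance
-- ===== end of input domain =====

-- B replaces the column dict + enumerate-over-sorted-keys pass by a dict-free loop that
-- repeatedly extracts the minimum-x column (min + filter + one-key sort), alternating
-- direction with a boolean flag (objective: alternative decomposition, not speed).

-- ===== PORT A =====
def build_boustrophedon_path (regions_in_slice : List (Int × Int)) : List (Int × Int) :=
  if regions_in_slice = [] then []
  else
    -- col_map.setdefault(rx, []).append(ry)  ≡  modify rx [] (· ++ [ry])
    let col_map : PySem.Dict Int (List Int) :=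
      regions_in_slice.foldl (fun d p => d.modify p.1 [] (fun l => l ++ [p.2])) PySem.Dict.empty
    -- for col_idx, rx in enumerate(sorted(col_map)): …
    (PySem.List.enumerate (PySem.List.sorted col_map.keys (fun x => x)) 0).foldl
      (fun path q =>
        let ry_list := PySem.List.sorted (col_map.getD q.2 []) (fun y => y)
        let ry_list := if PySem.Int.mod q.1 2 == 1 then ry_list.reverse else ry_list
        ry_list.foldl (fun path ry => path ++ [(q.2, ry)]) path)
      []

-- ===== PORT B =====
-- attach-elimination helper cited by bLoopB's decreasing_by
theorem pv_attach_map_fst (rest : List (Int × Int)) :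
    List.map (fun x : {q // q ∈ rest} => x.val.fst) rest.attach = List.map (fun q => q.fst) rest := by
  induction rest with
  | nil => rfl
  | cons a t ih => simpa using ih

-- termination of the Source B while-loop: removing the minimum-x column shrinks the list
theorem pv_filter_min_lt (p : Int × Int) (rest : List (Int × Int)) (x : Int)
    (hx : x = (rest.map (fun q => q.1)).foldl min p.1) :
    ((p :: rest).filter (fun q => q.1 != x)).length < (p :: rest).length := by
  rw [List.length_filter_lt_length_iff_exists]
  rcases PySem.List.foldl_min_mem (rest.map (fun q => q.1)) p.1 with h | h
  · refine ⟨p, by simp, ?_⟩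
    simp only [bne_iff_ne, ne_eq, Decidable.not_not]
    exact (hx.trans h).symm
  · rcases List.mem_map.1 h with ⟨q, hq, hq1⟩
    refine ⟨q, by simp [hq], ?_⟩
    simp only [bne_iff_ne, ne_eq, Decidable.not_not]
    exact hq1.trans hx.symm

-- the while-loop of Source B: pts/path/flip are the loop state
def bLoopB (pts : List (Int × Int)) (path : List (Int × Int)) (flip : Bool) : List (Int × Int) :=
  match pts with
  | [] => path
  | p :: rest =>
      -- x = min(p[0] for p in pts)   (min of a nonempty list = running min)
      let x := (rest.map (fun q => q.1)).foldl min p.1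
      -- col = sorted(p[1] for p in pts if p[0] == x)
      let col0 := PySem.List.sorted (((p :: rest).filter (fun q => q.1 == x)).map (fun q => q.2)) (fun y => y)
      let col := if flip then col0.reverse else col0
      bLoopB ((p :: rest).filter (fun q => q.1 != x)) (path ++ col.map (fun y => (x, y))) (!flip)
termination_by pts.length
decreasing_by
  apply pv_filter_min_lt
  exact congrArg (List.foldl min p.1) (pv_attach_map_fst rest)

def build_boustrophedon_path_alt (regions_in_slice : List (Int × Int)) : List (Int × Int) :=
  bLoopB regions_in_slice [] false

-- ===== PRECONDITION & SPEC =====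
def Spec_build_boustrophedon_path (regions_in_slice : List (Int × Int)) (out : List (Int × Int)) : Prop := out = build_boustrophedon_path_alt regions_in_slice
instance (regions_in_slice : List (Int × Int)) (out : List (Int × Int)) : Decidable (Spec_build_boustrophedon_path regions_in_slice out) := by unfold Spec_build_boustrophedon_path; infer_instance

-- ===== CLAIM (what is proved, stated in full; the proofs are below) =====
def Claim_equal_build_boustrophedon_path : Prop := ∀ (regions_in_slice : List (Int × Int)), Dom_build_boustrophedon_path regions_in_slice → Spec_build_boustrophedon_path regions_in_slice (build_boustrophedon_path regions_in_slice)

-- ===== LEMMAS AND PROOFS =====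

-- the sorted y-list of column x of pts
def pvColys (pts : List (Int × Int)) (x : Int) : List Int :=
  PySem.List.sorted ((pts.filter (fun q => q.1 == x)).map (fun q => q.2)) (fun y => y)

-- the ascending list of distinct x-coordinates of pts
def pvKeysSorted (pts : List (Int × Int)) : List Int :=
  PySem.List.sorted (PySem.Set.ofList (pts.map (fun q => q.1))) (fun x => x)

-- canonical alternating concatenation of the columns listed in S
def pvCanon (pts : List (Int × Int)) : Bool → List Int → List (Int × Int)
  | _, [] => []
  | flip, x :: S =>
      ((if flip then (pvColys pts x).reverse else pvColys pts x).map (fun y => (x, y)))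
        ++ pvCanon pts (!flip) S

theorem pvColys_filter (pts : List (Int × Int)) (x y : Int) (h : y ≠ x) :
    pvColys (pts.filter (fun q => q.1 != x)) y = pvColys pts y := by
  unfold pvColys
  rw [List.filter_filter]
  congr 2
  apply List.filter_congr
  intro q _
  by_cases hq : q.1 = y <;> simp [hq, h]

theorem pvCanon_filter (pts : List (Int × Int)) (x : Int) :
    ∀ (S : List Int) (flip : Bool), (∀ y ∈ S, y ≠ x) →
      pvCanon (pts.filter (fun q => q.1 != x)) flip S = pvCanon pts flip S := by
  intro S
  induction S with
  | nil => intro flip _; rfl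
  | cons y S ih =>
      intro flip h
      simp only [pvCanon]
      rw [pvColys_filter pts x y (h y (by simp)), ih (!flip) (fun z hz => h z (by simp [hz]))]

theorem pv_mod_succ_two (n : Int) :
    (PySem.Int.mod (n + 1) 2 == 1) = !(PySem.Int.mod n 2 == 1) := by
  have hm : ∀ m : Int, PySem.Int.mod m 2 = m % 2 := fun m => by
    simp [PySem.Int.mod, Int.fmod_eq_emod]
  rw [hm, hm]
  rcases Int.emod_two_eq_zero_or_one n with h | h
  · simp [show (n + 1) % 2 = 1 by omega, h]
  · simp [show (n + 1) % 2 = 0 by omega, h]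

theorem pv_flatMap_enum (pts : List (Int × Int)) :
    ∀ (S : List Int) (n : Int),
      (PySem.List.enumerate S n).flatMap
        (fun q => (if PySem.Int.mod q.1 2 == 1 then (pvColys pts q.2).reverse else pvColys pts q.2).map
          (fun y => (q.2, y)))
      = pvCanon pts (PySem.Int.mod n 2 == 1) S := by
  intro S
  induction S with
  | nil => intro n; simp [PySem.List.enumerate_nil, pvCanon]
  | cons x S ih =>
      intro n
      rw [PySem.List.enumerate_cons, List.flatMap_cons, ih (n + 1), pv_mod_succ_two]
      rfl

-- A in canonical form
theorem pvA_norm (pts : List (Int × Int)) :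
    build_boustrophedon_path pts = pvCanon pts false (pvKeysSorted pts) := by
  by_cases hp : pts = []
  · subst hp
    simp [build_boustrophedon_path, pvKeysSorted, PySem.Set.ofList, pvCanon,
      PySem.List.sorted]
  · unfold build_boustrophedon_path
    rw [if_neg hp]
    have hkeys :
        (pts.foldl (fun d p => d.modify p.1 [] (fun l => l ++ [p.2]))
          (PySem.Dict.empty : PySem.Dict Int (List Int))).keys
        = PySem.Set.ofList (pts.map (fun q => q.1)) := by
      rw [PySem.Dict.keys_foldl_modify_key pts (fun q => q.1) [] (fun _ p l => l ++ [p.2])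
        PySem.Dict.empty]
      rw [PySem.Dict.keys_empty, PySem.Set.update_nil_left]
    have hgetD : ∀ c : Int,
        (pts.foldl (fun d p => d.modify p.1 [] (fun l => l ++ [p.2]))
          (PySem.Dict.empty : PySem.Dict Int (List Int))).getD c []
        = (pts.filter (fun q => q.1 == c)).map (fun q => q.2) := by
      intro c
      rw [PySem.Dict.getD_foldl_modify_append pts PySem.Dict.empty c]
      simp [PySem.Dict.getD_empty]
    simp only [hkeys, hgetD, PySem.List.foldl_append_singleton_eq_map]
    rw [show (fun (path : List (Int × Int)) (q : Int × Int) =>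
          path ++ ((if PySem.Int.mod q.1 2 == 1
            then (PySem.List.sorted ((pts.filter (fun r => r.1 == q.2)).map (fun r => r.2)) (fun y => y)).reverse
            else PySem.List.sorted ((pts.filter (fun r => r.1 == q.2)).map (fun r => r.2)) (fun y => y)).map
              (fun y => (q.2, y))))
        = (fun path q => path ++ ((fun q => (if PySem.Int.mod q.1 2 == 1
            then (pvColys pts q.2).reverse else pvColys pts q.2).map (fun y => (q.2, y))) q)) from rfl]
    rw [PySem.List.foldl_append_eq_flatMap]
    rw [pv_flatMap_enum pts _ 0]
    rfl

-- decomposing the sorted distinct keys of a nonempty pts at its minimum x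
theorem pvKeys_cons (p : Int × Int) (rest : List (Int × Int)) :
    pvKeysSorted (p :: rest)
      = ((rest.map (fun q => q.1)).foldl min p.1)
        :: pvKeysSorted ((p :: rest).filter (fun q => q.1 != ((rest.map (fun q => q.1)).foldl min p.1))) := by
  set x := (rest.map (fun q => q.1)).foldl min p.1 with hx
  set pts' := (p :: rest).filter (fun q => q.1 != x) with hpts'
  have hxmem : x ∈ (p :: rest).map (fun q => q.1) := by
    rcases PySem.List.foldl_min_mem (rest.map (fun q => q.1)) p.1 with h | h
    · simp only [List.map_cons, List.mem_cons]; exact Or.inl h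
    · simp only [List.map_cons, List.mem_cons]; exact Or.inr (hx ▸ h)
  have hxmin : ∀ y ∈ (p :: rest).map (fun q => q.1), x ≤ y := by
    intro y hy
    rcases List.mem_cons.1 hy with h | h
    · exact h ▸ (PySem.List.foldl_min_le (rest.map (fun q => q.1)) p.1).1
    · exact (PySem.List.foldl_min_le (rest.map (fun q => q.1)) p.1).2 y h
  have hmem' : ∀ y, y ∈ pts'.map (fun q => q.1) ↔ (y ∈ (p :: rest).map (fun q => q.1) ∧ y ≠ x) := by
    intro y
    constructor
    · intro h
      rcases List.mem_map.1 h with ⟨q, hq, hq1⟩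
      have := List.of_mem_filter hq
      exact ⟨List.mem_map.2 ⟨q, List.mem_of_mem_filter hq, hq1⟩, by
        subst hq1; simpa using this⟩
    · intro ⟨h, hne⟩
      rcases List.mem_map.1 h with ⟨q, hq, hq1⟩
      exact List.mem_map.2 ⟨q, List.mem_filter.2 ⟨hq, by subst hq1; simpa using hne⟩, hq1⟩
  unfold pvKeysSorted
  apply PySem.List.sorted_eq_of_perm_of_pairwise_lt
  · -- permutation
    refine (List.Perm.cons x (PySem.List.sorted_perm _ _ _)).trans ?_
    have hnd1 : (x :: PySem.Set.ofList (pts'.map (fun q => q.1))).Nodup := by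
      refine List.nodup_cons.2 ⟨?_, PySem.Set.nodup_ofList _⟩
      intro hmem
      have := (hmem' x).1 ((PySem.Set.mem_ofList _ _).1 hmem)
      exact this.2 rfl
    refine (List.perm_ext_iff_of_nodup hnd1 (PySem.Set.nodup_ofList _)).2 ?_
    intro a
    simp only [List.mem_cons, PySem.Set.mem_ofList, hmem']
    constructor
    · rintro (rfl | ⟨h, _⟩)
      · exact hxmem
      · exact h
    · intro h
      by_cases ha : a = x
      · exact Or.inl ha
      · exact Or.inr ⟨h, ha⟩
  · -- strictly increasing
    refine List.pairwise_cons.2 ⟨?_, ?_⟩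
    · intro y hy
      have hy' := (PySem.List.mem_sorted _ _ _ _).1 hy
      have := (hmem' y).1 ((PySem.Set.mem_ofList _ _).1 hy')
      exact lt_of_le_of_ne (hxmin y this.1) (Ne.symm this.2)
    · exact PySem.List.sorted_ofList_pairwise_lt _

-- B in canonical form
theorem pvB_norm_aux :
    ∀ (n : Nat) (pts : List (Int × Int)), pts.length ≤ n →
      ∀ (path : List (Int × Int)) (flip : Bool),
        bLoopB pts path flip = path ++ pvCanon pts flip (pvKeysSorted pts) := by
  intro n
  induction n with
  | zero =>
      intro pts h path flip
      have hnil : pts = [] := List.eq_nil_of_length_eq_zero (Nat.le_zero.1 h)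
      subst hnil
      simp [bLoopB, pvKeysSorted, PySem.Set.ofList, PySem.List.sorted, pvCanon]
  | succ n ih =>
      intro pts h path flip
      match pts with
      | [] => simp [bLoopB, pvKeysSorted, PySem.Set.ofList, PySem.List.sorted, pvCanon]
      | p :: rest =>
        rw [bLoopB]
        have hlen : ((p :: rest).filter
            (fun q => q.1 != (rest.map (fun q => q.1)).foldl min p.1)).length ≤ n :=
          Nat.lt_succ_iff.1 (Nat.lt_of_lt_of_le (pv_filter_min_lt p rest _ rfl) h)
        rw [ih _ hlen]
        rw [pvKeys_cons p rest]
        have hmem : ∀ y ∈ pvKeysSorted ((p :: rest).filter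
            (fun q => q.1 != (rest.map (fun q => q.1)).foldl min p.1)),
            y ≠ (rest.map (fun q => q.1)).foldl min p.1 := by
          intro y hy hyx
          have hy' := (PySem.Set.mem_ofList _ _).1 ((PySem.List.mem_sorted _ _ _ _).1 hy)
          rcases List.mem_map.1 hy' with ⟨q, hq, hq1⟩
          have hqf := List.of_mem_filter hq
          simp [hq1, hyx] at hqf
        simp only [pvCanon]
        rw [← pvCanon_filter (p :: rest) _ _ (!flip) hmem]
        rw [← List.append_assoc]
        congr 1

theorem pvB_norm (pts path : List (Int × Int)) (flip : Bool) :
    bLoopB pts path flip = path ++ pvCanon pts flip (pvKeysSorted pts) :=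
  pvB_norm_aux pts.length pts le_rfl path flip

-- ===== VERDICT (by name: the statement is the Claim_ definition above) =====
theorem build_boustrophedon_path_spec : Claim_equal_build_boustrophedon_path := by
  intro pts _
  unfold Spec_build_boustrophedon_path build_boustrophedon_path_alt
  rw [pvA_norm, pvB_norm]
  rfl
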